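-- pv_equiv track=rewrite | github.com/spieglt/aoc2023 | day9.py | construct_pyramid
-- ===== SOURCE A (Python) =====
-- def construct_pyramid(seq):
--     pyramid = [seq]
--     current_layer = 0
--     while True:
--         if all(map(lambda x: x == 0, pyramid[current_layer])):
--             break
--         new_layer = []
--         for i, v in enumerate(pyramid[current_layer]):
--             if i == 0:
--                 continue
--             new_layer.append(v - pyramid[current_layer][i - 1])
--         pyramid.append(new_layer)
--         current_layer += 1
--     return pyramid
-- ===== SOURCE B (Python) =====
-- def construct_pyramid(seq):
--     if all(x == 0 for x in seq):
--         return [seq]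
--     diffs = [b - a for a, b in zip(seq, seq[1:])]
--     return [seq] + construct_pyramid(diffs)
-- ===== Notes on version B (the rewrite author's own statement) =====
-- stated objective: simpler
-- what changed: Replaces the while-loop with an explicit pyramid list and layer counter by direct structural recursion: base case an all-zero layer, otherwise prepend the layer to the pyramid of its zip-based difference list.
import Mathlib
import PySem

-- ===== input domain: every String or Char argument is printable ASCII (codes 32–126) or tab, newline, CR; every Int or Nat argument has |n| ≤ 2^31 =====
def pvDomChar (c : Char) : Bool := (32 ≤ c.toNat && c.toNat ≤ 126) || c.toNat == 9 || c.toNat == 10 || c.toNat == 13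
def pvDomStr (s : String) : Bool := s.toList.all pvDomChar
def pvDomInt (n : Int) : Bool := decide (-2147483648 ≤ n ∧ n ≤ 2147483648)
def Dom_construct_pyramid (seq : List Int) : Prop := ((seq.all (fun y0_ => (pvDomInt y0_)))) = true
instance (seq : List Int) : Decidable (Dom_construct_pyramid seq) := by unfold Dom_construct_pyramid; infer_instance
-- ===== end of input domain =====

-- B replaces A's while-loop with explicit pyramid list and layer counter by direct
-- structural recursion on the zip-based difference list (objective: simpler).

-- ===== PORT A =====
-- the inner 'for i, v in enumerate(...): if i == 0: continue; new_layer.append(v - layer[i-1])'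
def aNewLayer (layer : List Int) : List Int :=
  (PySem.List.enumerate layer 0).foldl
    (fun nl iv => if iv.1 = 0 then nl else nl ++ [iv.2 - PySem.List.pyGetD layer (iv.1 - 1) 0]) []

-- characterisation of the inner loop, cited by the termination argument of aLoop below
theorem aNewLayer_eq (layer : List Int) :
    aNewLayer layer = List.zipWith (fun a b => b - a) layer (layer.drop 1) := by
  have h : ∀ (xs acc : List Int) (s : Nat), xs = layer.drop (s+1) →
      (PySem.List.enumerate xs ((s : Int)+1)).foldl
        (fun nl iv => if iv.1 = 0 then nl
          else nl ++ [iv.2 - PySem.List.pyGetD layer (iv.1 - 1) 0]) acc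
      = acc ++ List.zipWith (fun a b => b - a) (layer.drop s) (layer.drop (s+1)) := by
    intro xs
    induction xs with
    | nil =>
      intro acc s hxs
      rw [PySem.List.enumerate_nil]
      simp [← hxs]
    | cons x xs ih =>
      intro acc s hxs
      have hslt : s + 1 < layer.length := by
        by_contra hc
        rw [List.drop_eq_nil_of_le (by omega)] at hxs
        exact List.cons_ne_nil _ _ hxs
      rw [PySem.List.enumerate_cons]
      simp only [List.foldl_cons]
      have hne : ((s : Int) + 1) ≠ 0 := by omega
      rw [if_neg hne]
      have hidx : ((s : Int) + 1 - 1) = ((s : Nat) : Int) := by omega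
      rw [hidx, PySem.List.pyGetD_natCast, List.getD_eq_getElem _ _ (by omega)]
      have hih := ih (acc ++ [x - layer[s]]) (s+1)
        (by rw [← List.drop_drop, ← hxs]; simp)
      have hcast : (((s+1 : Nat) : Int) + 1) = ((s : Int) + 1 + 1) := by push_cast; ring
      rw [hcast] at hih
      rw [hih]
      have hdrop : layer.drop s = layer[s] :: layer.drop (s+1) :=
        (List.getElem_cons_drop (by omega)).symm
      have hxs2 : layer.drop (s+1+1) = xs := by
        rw [← List.drop_drop, ← hxs]
        simp
      rw [hdrop, ← hxs, hxs2]
      simp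
  cases layer with
  | nil => simp [aNewLayer, PySem.List.enumerate_nil]
  | cons a rest =>
    unfold aNewLayer
    rw [PySem.List.enumerate_cons]
    simp only [List.foldl_cons]
    simp only [if_true]
    have h0 : ((0 : Nat) : Int) + 1 = (0 : Int) + 1 := by norm_num
    have := h rest [] 0 (by simp)
    rw [h0] at this
    rw [this]
    simp

-- 'while True: if all zero: break; build new_layer; append; current_layer += 1'
-- (pyramid accumulates the layers; the current layer is carried directly instead of by index)
def aLoop (layer : List Int) (pyramid : List (List Int)) : List (List Int) :=
  if layer.all (fun x => x = 0) then pyramid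
  else
    let nl := aNewLayer layer
    aLoop nl (pyramid ++ [nl])
termination_by layer.length
decreasing_by
  rename_i hz
  have h1 : layer ≠ [] := by intro h; subst h; simp at hz
  have h2 : 0 < layer.length := List.length_pos_iff.mpr h1
  rw [aNewLayer_eq]
  simp [List.length_zipWith]
  omega

def construct_pyramid (seq : List Int) : List (List Int) := aLoop seq [seq]

-- ===== PORT B =====
def construct_pyramid_alt (seq : List Int) : List (List Int) :=
  if seq.all (fun x => x = 0) then [seq]
  else seq :: construct_pyramid_alt (List.zipWith (fun a b => b - a) seq (seq.drop 1))
termination_by seq.length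
decreasing_by
  rename_i hz
  have h1 : seq ≠ [] := by intro h; subst h; simp at hz
  have h2 : 0 < seq.length := List.length_pos_iff.mpr h1
  simp [List.length_zipWith]
  omega

-- ===== PRECONDITION & SPEC =====
def Spec_construct_pyramid (seq : List Int) (out : List (List Int)) : Prop := out = construct_pyramid_alt seq
instance (seq : List Int) (out : List (List Int)) : Decidable (Spec_construct_pyramid seq out) := by unfold Spec_construct_pyramid; infer_instance

-- ===== CLAIM (what is proved, stated in full; the proofs are below) =====
def Claim_equal_construct_pyramid : Prop := ∀ (seq : List Int), Dom_construct_pyramid seq → Spec_construct_pyramid seq (construct_pyramid seq)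

-- ===== LEMMAS AND PROOFS =====

-- B's pyramid always starts with its argument
theorem alt_head (seq : List Int) :
    construct_pyramid_alt seq = seq :: (construct_pyramid_alt seq).drop 1 := by
  rw [construct_pyramid_alt]
  split <;> simp

-- the while loop appends exactly the tail of B's recursive pyramid
theorem aLoop_eq (n : Nat) (layer : List Int) (pyramid : List (List Int))
    (h : layer.length ≤ n) :
    aLoop layer pyramid = pyramid ++ (construct_pyramid_alt layer).drop 1 := by
  induction n generalizing layer pyramid with
  | zero =>
    have : layer = [] := List.eq_nil_of_length_eq_zero (by omega)
    subst this
    rw [aLoop, construct_pyramid_alt]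
    simp
  | succ n ih =>
    rw [aLoop]
    by_cases hz : layer.all (fun x => x = 0)
    · rw [if_pos hz, construct_pyramid_alt, if_pos hz]
      simp
    · rw [if_neg hz]
      have h1 : layer ≠ [] := by intro hh; subst hh; simp at hz
      have h2 : 0 < layer.length := List.length_pos_iff.mpr h1
      have hlen : (aNewLayer layer).length ≤ n := by
        rw [aNewLayer_eq]
        simp [List.length_zipWith]
        omega
      rw [ih _ _ hlen]
      rw [show (construct_pyramid_alt layer).drop 1
            = construct_pyramid_alt (aNewLayer layer) by
        conv_lhs => rw [construct_pyramid_alt, if_neg hz]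
        rw [aNewLayer_eq]
        simp]
      conv_rhs => rw [alt_head (aNewLayer layer)]
      simp

-- ===== VERDICT (by name: the statement is the Claim_ definition above) =====
theorem construct_pyramid_spec : Claim_equal_construct_pyramid := by
  intro seq _
  unfold Spec_construct_pyramid construct_pyramid
  rw [aLoop_eq seq.length seq [seq] le_rfl]
  conv_rhs => rw [alt_head seq]
  simp
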